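-- pv_equiv track=rewrite | github.com/nbdevs/ATS | interface.py | nameValidationMechanism
-- ===== SOURCE A (Python) =====
-- def nameValidationMechanism(fName):
--     """This methods validates the first name input taken during the start up menu."""
--
--     charString = []
--     size = len(fName)
--     for i in range(0, size):
--
--         if i == 0:
--             new = fName[i].upper()
--             charString.append(new)
--         else:
--             new = fName[i].lower()
--             charString.append(new)
--
--     name = "".join(charString)
--     return name
-- ===== SOURCE B (Python) =====
-- def nameValidationMechanism(fName):
--     """Closed-form: uppercase the head slice, lowercase the tail slice."""
--     return fName[:1].upper() + fName[1:].lower()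
-- ===== Notes on version B (the rewrite author's own statement) =====
-- stated objective: simpler
-- what changed: Replaces the index loop with per-character append by a closed-form expression: uppercase the [:1] slice, lowercase the [1:] slice, concatenate.
import Mathlib
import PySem

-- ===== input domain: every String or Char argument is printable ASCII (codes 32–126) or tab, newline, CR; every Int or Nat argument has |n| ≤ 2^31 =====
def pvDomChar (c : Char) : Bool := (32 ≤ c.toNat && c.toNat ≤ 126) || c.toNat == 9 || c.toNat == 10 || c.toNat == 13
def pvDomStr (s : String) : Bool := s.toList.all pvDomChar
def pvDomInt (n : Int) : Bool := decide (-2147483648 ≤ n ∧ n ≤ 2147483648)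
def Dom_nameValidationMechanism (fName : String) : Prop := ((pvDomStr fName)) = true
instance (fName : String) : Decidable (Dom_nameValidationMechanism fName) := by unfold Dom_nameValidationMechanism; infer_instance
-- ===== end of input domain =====

-- B replaces A's per-index loop by the closed form upper(fName[:1]) ++ lower(fName[1:]) (objective: simpler).

-- ===== PORT A =====
-- A: loop i in range(0, len(fName)); i == 0 → append fName[i].upper(), else append fName[i].lower(); join.
def nameValidationMechanism (fName : String) : String :=
  let s := fName.toList
  let size : Int := PySem.Chars.len s
  let charString : List Char :=
    (PySem.List.pyRange 0 size 1).foldl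
      (fun acc i =>
        if i = 0 then acc ++ [PySem.Chars.upperChar (PySem.List.pyGetD s i ' ')]
        else acc ++ [PySem.Chars.lowerChar (PySem.List.pyGetD s i ' ')]) []
  String.ofList charString

-- ===== PORT B =====
def nameValidationMechanism_alt (fName : String) : String :=
  PySem.Str.upper (PySem.Str.slice fName none (some 1)) ++
    PySem.Str.lower (PySem.Str.slice fName (some 1) none)

-- ===== PRECONDITION & SPEC =====
def Spec_nameValidationMechanism (fName : String) (out : String) : Prop := out = nameValidationMechanism_alt fName
instance (fName : String) (out : String) : Decidable (Spec_nameValidationMechanism fName out) := by unfold Spec_nameValidationMechanism; infer_instance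

-- ===== CLAIM (what is proved, stated in full; the proofs are below) =====
def Claim_equal_nameValidationMechanism : Prop := ∀ (fName : String), Dom_nameValidationMechanism fName → Spec_nameValidationMechanism fName (nameValidationMechanism fName)

-- ===== LEMMAS AND PROOFS =====

theorem nvm_fold_eq_map {α : Type} (U L : Int → α) (l : List Int) (acc : List α) :
    l.foldl (fun acc i => if i = 0 then acc ++ [U i] else acc ++ [L i]) acc
      = acc ++ l.map (fun i => if i = 0 then U i else L i) := by
  induction l generalizing acc with
  | nil => simp
  | cons x xs ih => by_cases hx : x = 0 <;> simp [hx, ih]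

theorem nvm_toList_eq (fName : String) :
    (nameValidationMechanism fName).toList = (nameValidationMechanism_alt fName).toList := by
  unfold nameValidationMechanism nameValidationMechanism_alt
  simp only [nvm_fold_eq_map]
  cases h : fName.toList with
  | nil =>
      simp [h, PySem.Chars.len, PySem.List.pyRange_one_eq_nil, PySem.Str.upper,
        PySem.Str.lower, PySem.Str.slice, PySem.Chars.upper, PySem.Chars.lower,
        PySem.Chars.slice, PySem.List.slice]
  | cons c rest =>
      have hlen : (PySem.Chars.len (c :: rest) : Int) = ((rest.length + 1 : Nat) : Int) := by
        simp [PySem.Chars.len]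
      have hcons : PySem.List.pyRange 0 (PySem.Chars.len (c :: rest)) 1
          = 0 :: PySem.List.pyRange 1 (PySem.Chars.len (c :: rest)) 1 := by
        apply PySem.List.pyRange_one_cons
        simp [PySem.Chars.len]
      have hdrop : (PySem.List.pyRange 1 (PySem.Chars.len (c :: rest)) 1).map
          (fun j => PySem.List.pyGetD (c :: rest) j ' ') = (c :: rest).drop 1 := by
        have := PySem.List.map_pyGetD_pyRange (xs := c :: rest) (a := 1) (d := ' ')
          (by norm_num)
        simpa [PySem.Chars.len] using this
      have hmap : (PySem.List.pyRange 1 (PySem.Chars.len (c :: rest)) 1).map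
          (fun i => if i = 0 then PySem.Chars.upperChar (PySem.List.pyGetD (c :: rest) i ' ')
                    else PySem.Chars.lowerChar (PySem.List.pyGetD (c :: rest) i ' '))
          = rest.map PySem.Chars.lowerChar := by
        have hmem : ∀ i ∈ PySem.List.pyRange 1 (PySem.Chars.len (c :: rest)) 1,
            (if i = 0 then PySem.Chars.upperChar (PySem.List.pyGetD (c :: rest) i ' ')
             else PySem.Chars.lowerChar (PySem.List.pyGetD (c :: rest) i ' '))
            = PySem.Chars.lowerChar (PySem.List.pyGetD (c :: rest) i ' ') := by
          intro i hi
          rw [PySem.List.mem_pyRange_one] at hi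
          have : i ≠ 0 := by omega
          simp [this]
        calc (PySem.List.pyRange 1 (PySem.Chars.len (c :: rest)) 1).map _
            = (PySem.List.pyRange 1 (PySem.Chars.len (c :: rest)) 1).map
                (fun i => PySem.Chars.lowerChar (PySem.List.pyGetD (c :: rest) i ' ')) :=
              List.map_congr_left hmem
          _ = ((PySem.List.pyRange 1 (PySem.Chars.len (c :: rest)) 1).map
                (fun j => PySem.List.pyGetD (c :: rest) j ' ')).map PySem.Chars.lowerChar := by
              rw [List.map_map]; rfl
          _ = rest.map PySem.Chars.lowerChar := by rw [hdrop]; simp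
      rw [hcons]
      simp only [List.map_cons, hmap]
      simp [PySem.Str.upper, PySem.Str.lower, PySem.Str.slice, PySem.Chars.upper,
        PySem.Chars.lower, h, PySem.Chars.slice_eq_listSlice, PySem.List.slice_to,
        PySem.List.slice_from, PySem.List.pyGetD, String.toList_ofList, String.toList_append]

-- ===== VERDICT (by name: the statement is the Claim_ definition above) =====
theorem nameValidationMechanism_spec : Claim_equal_nameValidationMechanism := by
  intro fName _
  unfold Spec_nameValidationMechanism
  have := nvm_toList_eq fName
  exact String.toList_injective this
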